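-- pv_equiv track=rewrite | github.com/BlackOpsCoder/Coding-Competitions | acsl/acslContest2Problem.py | verifyPlate
-- ===== SOURCE A (Python) =====
-- def verifyPlate(plate):
--     # Write your code here
--     letters = 0
--     digits = 0
--     dashes = 0
--     spaces = 0
--     character_list = []
--     if len(plate) > 8:
--         return "IV"
--     plate = list(plate)
--     for char in plate:
--         if char == " ":
--             spaces += 1
--             character_list.append(" ")
--         elif char == "-":
--             dashes += 1
--             character_list.append("d")
--         elif char.isalpha():
--             letters += 1
--             character_list.append("a")
--         elif char.isalpha() == False:
--             digits += 1
--             character_list.append("n")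
--         else:
--             return "IV"
--
--     if character_list == ['n', 'n', 'n', 'n', 'n', 'n', 'n']:
--         return "G7A"
--     elif character_list == ['n', 'n', 'n', 'n', 'n', 'n']:
--         return "G6A"
--     elif character_list == ['a', 'a', 'a', 'd', 'n', 'n', 'n', 'a'] or character_list == ['a', 'a', 'a', 'd', 'a', 'n', 'n', 'n'] or character_list == ['a', 'a', 'a', 'd', 'n', 'a', 'n', 'n'] or character_list == ['a', 'a', 'a', 'd', 'n', 'n', 'a', 'n']:
--         return "G7B"
--     elif character_list == ['a', 'a', 'd', 'n', 'n', 'n', 'n', 'n']: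
--         return "G7E"
--     elif character_list == ['a', 'a', 'a', 'd', 'n', 'n', 'a'] or character_list == ['a', 'a', 'a', 'd', 'a', 'n', 'n'] or character_list == ['a', 'a', 'a', 'd', 'n', 'a', 'n']:
--         return "G6B"
--     elif character_list == ['n', 'n', 'n', 'd', 'a', 'a', 'a']:
--         return "G6D"
--     elif character_list == ['a', 'a', 'a', 'd', 'n', 'n', 'n']:
--         return "G6C"
--     elif character_list == ['a', 'a', 'a', 'n', 'n', 'n', 'n']:
--         return "G7D"
--     elif character_list == ['n', 'n', 'n', 'n', 'a', 'a', 'a']: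
--         return "G7C"
--     elif digits == 4 and letters == 3 and dashes == 0 and spaces == 0:
--         return "G7F"
--     elif (character_list[:2] == ['a', 'a']) and ((digits + letters) <= 7) and (dashes + spaces <= 1):
--         return "V"
--     else:
--         return "IV"
-- ===== SOURCE B (Python) =====
-- def _kind(ch):
--     if ch == " ":
--         return " "
--     if ch == "-":
--         return "d"
--     if ch.isalpha():
--         return "a"
--     return "n"
--
--
-- def verifyPlate(plate):
--     # Decision tree over counts and positional character classes; no signature
--     # list and no pattern table.  Each accepted format is characterised by its
--     # length, its four class counts and the classes at a few fixed positions
--     # (which, together with the counts, pin the whole layout down).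
--     if len(plate) > 8:
--         return "IV"
--     n = len(plate)
--     letters = digits = dashes = spaces = 0
--     for ch in plate:
--         k = _kind(ch)
--         if k == "a":
--             letters += 1
--         elif k == "n":
--             digits += 1
--         elif k == "d":
--             dashes += 1
--         else:
--             spaces += 1
--
--     def K(i):
--         return _kind(plate[i])
--
--     if spaces == 0:
--         if dashes == 0:
--             if letters == 0:
--                 if n == 7:
--                     return "G7A"
--                 if n == 6:
--                     return "G6A"
--             if letters == 3 and digits == 4:
--                 if K(0) == "a" and K(1) == "a" and K(2) == "a":
--                     return "G7D"
--                 if K(4) == "a" and K(5) == "a" and K(6) == "a":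
--                     return "G7C"
--                 return "G7F"
--         elif dashes == 1:
--             if n == 8 and K(3) == "d" and K(0) == "a" and K(1) == "a" and K(2) == "a" and letters == 4:
--                 return "G7B"
--             if n == 8 and K(2) == "d" and K(0) == "a" and K(1) == "a" and letters == 2:
--                 return "G7E"
--             if n == 7 and K(3) == "d":
--                 if K(0) == "a" and K(1) == "a" and K(2) == "a":
--                     if letters == 4:
--                         return "G6B"
--                     if letters == 3:
--                         return "G6C"
--                 if K(4) == "a" and K(5) == "a" and K(6) == "a" and letters == 3:
--                     return "G6D"
--     if n >= 2 and K(0) == "a" and K(1) == "a" and digits + letters <= 7 and dashes + spaces <= 1: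
--         return "V"
--     return "IV"
-- ===== Notes on version B (the rewrite author's own statement) =====
-- stated objective: alternative
-- what changed: B drops A's signature list and 12-branch chain of literal pattern comparisons entirely: it keeps only the four class counters plus positional class checks at a few fixed indices, and classifies with a nested count/position decision tree (each format is pinned down by length, counts and a handful of positions), keeping the V/IV fall-through.
import Mathlib
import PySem

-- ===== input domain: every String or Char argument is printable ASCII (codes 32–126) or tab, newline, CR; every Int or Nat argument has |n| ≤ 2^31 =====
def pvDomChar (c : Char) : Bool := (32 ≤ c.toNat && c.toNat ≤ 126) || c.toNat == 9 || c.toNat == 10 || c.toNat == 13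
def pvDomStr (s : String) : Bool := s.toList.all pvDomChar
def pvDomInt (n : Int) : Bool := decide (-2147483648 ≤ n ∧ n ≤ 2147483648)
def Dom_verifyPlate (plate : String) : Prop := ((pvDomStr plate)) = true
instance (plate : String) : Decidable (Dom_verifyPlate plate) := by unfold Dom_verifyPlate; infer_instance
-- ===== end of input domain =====

-- B replaces A's signature list + 12-branch literal-pattern chain by a decision tree over the
-- four class counts and a few positional class checks (objective: alternative/simpler).

-- ===== PORT A =====
-- after the loop: the elif chain over character_list and the counters (verbatim branch order)
def vpTail (cl : List Char) (letters digits dashes spaces : Nat) : String :=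
  if cl = ['n','n','n','n','n','n','n'] then "G7A"
  else if cl = ['n','n','n','n','n','n'] then "G6A"
  else if cl = ['a','a','a','d','n','n','n','a'] ∨ cl = ['a','a','a','d','a','n','n','n'] ∨
          cl = ['a','a','a','d','n','a','n','n'] ∨ cl = ['a','a','a','d','n','n','a','n'] then "G7B"
  else if cl = ['a','a','d','n','n','n','n','n'] then "G7E"
  else if cl = ['a','a','a','d','n','n','a'] ∨ cl = ['a','a','a','d','a','n','n'] ∨
          cl = ['a','a','a','d','n','a','n'] then "G6B"
  else if cl = ['n','n','n','d','a','a','a'] then "G6D"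
  else if cl = ['a','a','a','d','n','n','n'] then "G6C"
  else if cl = ['a','a','a','n','n','n','n'] then "G7D"
  else if cl = ['n','n','n','n','a','a','a'] then "G7C"
  else if digits = 4 ∧ letters = 3 ∧ dashes = 0 ∧ spaces = 0 then "G7F"
  -- cl[:2] on a list is List.take 2 (exact: Python slice [:2])
  else if cl.take 2 = ['a','a'] ∧ digits + letters ≤ 7 ∧ dashes + spaces ≤ 1 then "V"
  else "IV"

-- the for-loop over the characters, carrying the four counters and character_list
def vpLoop : List Char → Nat → Nat → Nat → Nat → List Char → String
  | [], letters, digits, dashes, spaces, cl => vpTail cl letters digits dashes spaces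
  | c :: rest, letters, digits, dashes, spaces, cl =>
    if c = ' ' then vpLoop rest letters digits dashes (spaces + 1) (cl ++ [' '])
    else if c = '-' then vpLoop rest letters digits (dashes + 1) spaces (cl ++ ['d'])
    else if PySem.Chars.isalpha c then vpLoop rest (letters + 1) digits dashes spaces (cl ++ ['a'])
    else if PySem.Chars.isalpha c = false then vpLoop rest letters (digits + 1) dashes spaces (cl ++ ['n'])
    else "IV"  -- dead branch, kept from A

def verifyPlate (plate : String) : String :=
  if PySem.Str.len plate > 8 then "IV"
  else vpLoop plate.toList 0 0 0 0 []

-- ===== PORT B =====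
-- Source B's _kind
def vpKind (c : Char) : Char :=
  if c = ' ' then ' '
  else if c = '-' then 'd'
  else if PySem.Chars.isalpha c then 'a'
  else 'n'

-- Source B's counting loop body (state = (letters, digits, dashes, spaces))
def vpCountStep (st : Nat × Nat × Nat × Nat) (ch : Char) : Nat × Nat × Nat × Nat :=
  let k := vpKind ch
  if k = 'a' then (st.1 + 1, st.2.1, st.2.2.1, st.2.2.2)
  else if k = 'n' then (st.1, st.2.1 + 1, st.2.2.1, st.2.2.2)
  else if k = 'd' then (st.1, st.2.1, st.2.2.1 + 1, st.2.2.2)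
  else (st.1, st.2.1, st.2.2.1, st.2.2.2 + 1)

def verifyPlate_alt (plate : String) : String :=
  if PySem.Str.len plate > 8 then "IV"
  else
    let l := plate.toList
    let n := l.length
    let st := l.foldl vpCountStep (0, 0, 0, 0)
    let letters := st.1
    let digits := st.2.1
    let dashes := st.2.2.1
    let spaces := st.2.2.2
    -- K i = _kind(plate[i]); every read below is guarded so the index is in range, where getD is exact
    let K : Nat → Char := fun i => vpKind (l.getD i ' ')
    -- the common fall-through: the V test, else "IV"
    let fb : String :=
      if 2 ≤ n ∧ K 0 = 'a' ∧ K 1 = 'a' ∧ digits + letters ≤ 7 ∧ dashes + spaces ≤ 1 then "V" else "IV"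
    if spaces = 0 then
      if dashes = 0 then
        if letters = 0 ∧ n = 7 then "G7A"
        else if letters = 0 ∧ n = 6 then "G6A"
        else if letters = 3 ∧ digits = 4 then
          if K 0 = 'a' ∧ K 1 = 'a' ∧ K 2 = 'a' then "G7D"
          else if K 4 = 'a' ∧ K 5 = 'a' ∧ K 6 = 'a' then "G7C"
          else "G7F"
        else fb
      else if dashes = 1 then
        if n = 8 ∧ K 3 = 'd' ∧ K 0 = 'a' ∧ K 1 = 'a' ∧ K 2 = 'a' ∧ letters = 4 then "G7B"
        else if n = 8 ∧ K 2 = 'd' ∧ K 0 = 'a' ∧ K 1 = 'a' ∧ letters = 2 then "G7E"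
        else if n = 7 ∧ K 3 = 'd' then
          if K 0 = 'a' ∧ K 1 = 'a' ∧ K 2 = 'a' then
            if letters = 4 then "G6B"
            else if letters = 3 then "G6C"
            else fb
          else if K 4 = 'a' ∧ K 5 = 'a' ∧ K 6 = 'a' ∧ letters = 3 then "G6D"
          else fb
        else fb
      else fb
    else fb

-- ===== PRECONDITION & SPEC =====
def Spec_verifyPlate (plate : String) (out : String) : Prop := out = verifyPlate_alt plate
instance (plate : String) (out : String) : Decidable (Spec_verifyPlate plate out) := by unfold Spec_verifyPlate; infer_instance

-- ===== CLAIM (what is proved, stated in full; the proofs are below) =====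
def Claim_equal_verifyPlate : Prop := ∀ (plate : String), Dom_verifyPlate plate → Spec_verifyPlate plate (verifyPlate plate)

-- ===== LEMMAS AND PROOFS =====

-- B's decision tree, as a function of the signature list alone (sig = map vpKind of the input;
-- counts, length and positional reads of B all factor through sig)
def vpBTail (s : List Char) : String :=
  let n := s.length
  let letters := s.count 'a'
  let digits := s.count 'n'
  let dashes := s.count 'd'
  let spaces := s.count ' '
  let K : Nat → Char := fun i => s.getD i ' '
  let fb : String :=
    if 2 ≤ n ∧ K 0 = 'a' ∧ K 1 = 'a' ∧ digits + letters ≤ 7 ∧ dashes + spaces ≤ 1 then "V" else "IV"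
  if spaces = 0 then
    if dashes = 0 then
      if letters = 0 ∧ n = 7 then "G7A"
      else if letters = 0 ∧ n = 6 then "G6A"
      else if letters = 3 ∧ digits = 4 then
        if K 0 = 'a' ∧ K 1 = 'a' ∧ K 2 = 'a' then "G7D"
        else if K 4 = 'a' ∧ K 5 = 'a' ∧ K 6 = 'a' then "G7C"
        else "G7F"
      else fb
    else if dashes = 1 then
      if n = 8 ∧ K 3 = 'd' ∧ K 0 = 'a' ∧ K 1 = 'a' ∧ K 2 = 'a' ∧ letters = 4 then "G7B"
      else if n = 8 ∧ K 2 = 'd' ∧ K 0 = 'a' ∧ K 1 = 'a' ∧ letters = 2 then "G7E"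
      else if n = 7 ∧ K 3 = 'd' then
        if K 0 = 'a' ∧ K 1 = 'a' ∧ K 2 = 'a' then
          if letters = 4 then "G6B"
          else if letters = 3 then "G6C"
          else fb
        else if K 4 = 'a' ∧ K 5 = 'a' ∧ K 6 = 'a' ∧ letters = 3 then "G6D"
        else fb
      else fb
    else fb
  else fb

-- the 14 literal signature patterns of A's elif chain, in chain order
def vpPats : List (List Char) :=
  [['n','n','n','n','n','n','n'], ['n','n','n','n','n','n'],
   ['a','a','a','d','n','n','n','a'], ['a','a','a','d','a','n','n','n'],
   ['a','a','a','d','n','a','n','n'], ['a','a','a','d','n','n','a','n'],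
   ['a','a','d','n','n','n','n','n'],
   ['a','a','a','d','n','n','a'], ['a','a','a','d','a','n','n'], ['a','a','a','d','n','a','n'],
   ['n','n','n','d','a','a','a'], ['a','a','a','d','n','n','n'],
   ['a','a','a','n','n','n','n'], ['n','n','n','n','a','a','a']]

-- vpKind always yields one of the four class symbols
theorem vpKind_mem (c : Char) : vpKind c = 'a' ∨ vpKind c = 'n' ∨ vpKind c = 'd' ∨ vpKind c = ' ' := by
  unfold vpKind; split_ifs <;> simp

-- the four class counts of a signature list partition its length
theorem countSum (s : List Char) (halpha : ∀ c ∈ s, c = 'a' ∨ c = 'n' ∨ c = 'd' ∨ c = ' ') :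
    s.count 'a' + s.count 'n' + s.count 'd' + s.count ' ' = s.length := by
  induction s with
  | nil => simp
  | cons c t ih =>
    have ht := ih (fun x hx => halpha x (List.mem_cons_of_mem _ hx))
    rcases halpha c List.mem_cons_self with rfl | rfl | rfl | rfl <;>
      simp <;> omega

-- cl[:2] = ['a','a'] expressed through length and positional reads
theorem take2_iff (s : List Char) :
    s.take 2 = ['a','a'] ↔ 2 ≤ s.length ∧ s.getD 0 ' ' = 'a' ∧ s.getD 1 ' ' = 'a' := by
  rcases s with _ | ⟨c0, s⟩
  · simp
  · rcases s with _ | ⟨c1, s⟩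
    · simp
    · simp [List.take]

theorem fb_align (s : List Char) (X : Prop) [Decidable X] :
    (if s.take 2 = ['a','a'] ∧ X then "V" else "IV") =
    (if 2 ≤ s.length ∧ s.getD 0 ' ' = 'a' ∧ s.getD 1 ' ' = 'a' ∧ X then "V" else "IV") := by
  refine if_congr ?_ rfl rfl
  rw [take2_iff]; tauto

-- when s matches none of the 14 patterns and the G7F counts fail, A's chain is the V/IV fall-through
theorem vpTail_fb (s : List Char) (ca cn cd csp : Nat)
    (hne : ∀ p ∈ vpPats, s ≠ p)
    (hf : ¬(cn = 4 ∧ ca = 3 ∧ cd = 0 ∧ csp = 0)) :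
    vpTail s ca cn cd csp =
      (if s.take 2 = ['a','a'] ∧ cn + ca ≤ 7 ∧ cd + csp ≤ 1 then "V" else "IV") := by
  have h1 := hne ['n','n','n','n','n','n','n'] (by simp [vpPats])
  have h2 := hne ['n','n','n','n','n','n'] (by simp [vpPats])
  have h3 := hne ['a','a','a','d','n','n','n','a'] (by simp [vpPats])
  have h4 := hne ['a','a','a','d','a','n','n','n'] (by simp [vpPats])
  have h5 := hne ['a','a','a','d','n','a','n','n'] (by simp [vpPats])
  have h6 := hne ['a','a','a','d','n','n','a','n'] (by simp [vpPats])
  have h7 := hne ['a','a','d','n','n','n','n','n'] (by simp [vpPats])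
  have h8 := hne ['a','a','a','d','n','n','a'] (by simp [vpPats])
  have h9 := hne ['a','a','a','d','a','n','n'] (by simp [vpPats])
  have h10 := hne ['a','a','a','d','n','a','n'] (by simp [vpPats])
  have h11 := hne ['n','n','n','d','a','a','a'] (by simp [vpPats])
  have h12 := hne ['a','a','a','d','n','n','n'] (by simp [vpPats])
  have h13 := hne ['a','a','a','n','n','n','n'] (by simp [vpPats])
  have h14 := hne ['n','n','n','n','a','a','a'] (by simp [vpPats])
  simp [vpTail, h1, h2, h3, h4, h5, h6, h7, h8, h9, h10, h11, h12, h13, h14, hf]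

theorem exlen6 (s : List Char) (h : s.length = 6) :
    ∃ c0 c1 c2 c3 c4 c5, s = [c0, c1, c2, c3, c4, c5] := by
  rcases s with _ | ⟨c0, s⟩; · simp at h
  rcases s with _ | ⟨c1, s⟩; · simp at h
  rcases s with _ | ⟨c2, s⟩; · simp at h
  rcases s with _ | ⟨c3, s⟩; · simp at h
  rcases s with _ | ⟨c4, s⟩; · simp at h
  rcases s with _ | ⟨c5, s⟩; · simp at h
  rcases s with _ | ⟨c6, s⟩
  · exact ⟨c0, c1, c2, c3, c4, c5, rfl⟩
  · simp at h

theorem exlen7 (s : List Char) (h : s.length = 7) :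
    ∃ c0 c1 c2 c3 c4 c5 c6, s = [c0, c1, c2, c3, c4, c5, c6] := by
  rcases s with _ | ⟨c0, s⟩; · simp at h
  obtain ⟨c1, c2, c3, c4, c5, c6, rfl⟩ := exlen6 s (by simpa using h)
  exact ⟨c0, c1, c2, c3, c4, c5, c6, rfl⟩

theorem exlen8 (s : List Char) (h : s.length = 8) :
    ∃ c0 c1 c2 c3 c4 c5 c6 c7, s = [c0, c1, c2, c3, c4, c5, c6, c7] := by
  rcases s with _ | ⟨c0, s⟩; · simp at h
  obtain ⟨c1, c2, c3, c4, c5, c6, c7, rfl⟩ := exlen7 s (by simpa using h)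
  exact ⟨c0, c1, c2, c3, c4, c5, c6, c7, rfl⟩

-- the heart of the equivalence: on any signature list, A's elif chain and B's decision tree agree
theorem tails_eq (s : List Char)
    (halpha : ∀ c ∈ s, c = 'a' ∨ c = 'n' ∨ c = 'd' ∨ c = ' ') :
    vpTail s (s.count 'a') (s.count 'n') (s.count 'd') (s.count ' ') = vpBTail s := by
  have hsum := countSum s halpha
  by_cases hsp : s.count ' ' = 0
  · have hspm : ' ' ∉ s := List.count_eq_zero.mp hsp
    have h3way : ∀ c ∈ s, c = 'a' ∨ c = 'n' ∨ c = 'd' := by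
      intro c hc
      rcases halpha c hc with rfl | rfl | rfl | rfl
      · exact Or.inl rfl
      · exact Or.inr (Or.inl rfl)
      · exact Or.inr (Or.inr rfl)
      · exact absurd hc hspm
    by_cases hd0 : s.count 'd' = 0
    · have hdm : 'd' ∉ s := List.count_eq_zero.mp hd0
      have h2way : ∀ c ∈ s, c = 'a' ∨ c = 'n' := by
        intro c hc
        rcases h3way c hc with rfl | rfl | rfl
        · exact Or.inl rfl
        · exact Or.inr rfl
        · exact absurd hc hdm
      by_cases hg1 : s.count 'a' = 0 ∧ s.length = 7
      · obtain ⟨ha0, h7⟩ := hg1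
        have ham : 'a' ∉ s := List.count_eq_zero.mp ha0
        have hn : ∀ c ∈ s, c = 'n' := by
          intro c hc
          rcases h2way c hc with rfl | rfl
          · exact absurd hc ham
          · rfl
        obtain ⟨c0, c1, c2, c3, c4, c5, c6, rfl⟩ := exlen7 s h7
        obtain rfl := hn c0 (by simp)
        obtain rfl := hn c1 (by simp)
        obtain rfl := hn c2 (by simp)
        obtain rfl := hn c3 (by simp)
        obtain rfl := hn c4 (by simp)
        obtain rfl := hn c5 (by simp)
        obtain rfl := hn c6 (by simp)
        decide
      · by_cases hg2 : s.count 'a' = 0 ∧ s.length = 6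
        · obtain ⟨ha0, h6⟩ := hg2
          have ham : 'a' ∉ s := List.count_eq_zero.mp ha0
          have hn : ∀ c ∈ s, c = 'n' := by
            intro c hc
            rcases h2way c hc with rfl | rfl
            · exact absurd hc ham
            · rfl
          obtain ⟨c0, c1, c2, c3, c4, c5, rfl⟩ := exlen6 s h6
          obtain rfl := hn c0 (by simp)
          obtain rfl := hn c1 (by simp)
          obtain rfl := hn c2 (by simp)
          obtain rfl := hn c3 (by simp)
          obtain rfl := hn c4 (by simp)
          obtain rfl := hn c5 (by simp)
          decide
        · by_cases hg3 : s.count 'a' = 3 ∧ s.count 'n' = 4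
          · have h7 : s.length = 7 := by omega
            obtain ⟨c0, c1, c2, c3, c4, c5, c6, rfl⟩ := exlen7 s h7
            have e0 := h2way c0 (by simp)
            have e1 := h2way c1 (by simp)
            have e2 := h2way c2 (by simp)
            have e3 := h2way c3 (by simp)
            have e4 := h2way c4 (by simp)
            have e5 := h2way c5 (by simp)
            have e6 := h2way c6 (by simp)
            rcases e0 with rfl | rfl <;> rcases e1 with rfl | rfl <;>
              rcases e2 with rfl | rfl <;> rcases e3 with rfl | rfl <;>
              rcases e4 with rfl | rfl <;> rcases e5 with rfl | rfl <;>
              rcases e6 with rfl | rfl <;> decide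
          · have hprop : ∀ q ∈ vpPats, q.count 'd' = 1 ∨ (q.count 'a' = 0 ∧ q.length = 7) ∨
                (q.count 'a' = 0 ∧ q.length = 6) ∨ (q.count 'a' = 3 ∧ q.count 'n' = 4) := by decide
            have hne : ∀ p ∈ vpPats, s ≠ p := by
              intro p hp heq
              rcases hprop p hp with h | h | h | h
              · rw [← heq] at h; omega
              · rw [← heq] at h; exact hg1 h
              · rw [← heq] at h; exact hg2 h
              · rw [← heq] at h; exact hg3 h
            rw [vpTail_fb s _ _ _ _ hne (by rintro ⟨h4, h3, -, -⟩; exact hg3 ⟨h3, h4⟩)]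
            rw [fb_align]
            simp [vpBTail, hsp, hd0, hg1, hg2, hg3]
    · by_cases hd1 : s.count 'd' = 1
      · by_cases hg4 : s.length = 8 ∧ s.getD 3 ' ' = 'd' ∧ s.getD 0 ' ' = 'a' ∧
            s.getD 1 ' ' = 'a' ∧ s.getD 2 ' ' = 'a' ∧ s.count 'a' = 4
        · obtain ⟨h8, hK3, hK0, hK1, hK2, -⟩ := hg4
          obtain ⟨c0, c1, c2, c3, c4, c5, c6, c7, rfl⟩ := exlen8 s h8
          simp only [List.getD_cons_zero, List.getD_cons_succ] at hK0 hK1 hK2 hK3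
          subst hK0; subst hK1; subst hK2; subst hK3
          have e4 := h3way c4 (by simp)
          have e5 := h3way c5 (by simp)
          have e6 := h3way c6 (by simp)
          have e7 := h3way c7 (by simp)
          rcases e4 with rfl | rfl | rfl <;> rcases e5 with rfl | rfl | rfl <;>
            rcases e6 with rfl | rfl | rfl <;> rcases e7 with rfl | rfl | rfl <;>
            first
              | exact absurd hd1 (by decide)
              | decide
        · by_cases hg5 : s.length = 8 ∧ s.getD 2 ' ' = 'd' ∧ s.getD 0 ' ' = 'a' ∧
              s.getD 1 ' ' = 'a' ∧ s.count 'a' = 2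
          · obtain ⟨h8, hK2, hK0, hK1, -⟩ := hg5
            obtain ⟨c0, c1, c2, c3, c4, c5, c6, c7, rfl⟩ := exlen8 s h8
            simp only [List.getD_cons_zero, List.getD_cons_succ] at hK0 hK1 hK2
            subst hK0; subst hK1; subst hK2
            have e3 := h3way c3 (by simp)
            have e4 := h3way c4 (by simp)
            have e5 := h3way c5 (by simp)
            have e6 := h3way c6 (by simp)
            have e7 := h3way c7 (by simp)
            rcases e3 with rfl | rfl | rfl <;> rcases e4 with rfl | rfl | rfl <;>
              rcases e5 with rfl | rfl | rfl <;> rcases e6 with rfl | rfl | rfl <;>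
              rcases e7 with rfl | rfl | rfl <;>
              first
                | exact absurd hd1 (by decide)
                | decide
          · by_cases hg6 : s.length = 7 ∧ s.getD 3 ' ' = 'd'
            · obtain ⟨h7, hK3⟩ := hg6
              obtain ⟨c0, c1, c2, c3, c4, c5, c6, rfl⟩ := exlen7 s h7
              simp only [List.getD_cons_zero, List.getD_cons_succ] at hK3
              subst hK3
              have e0 := h3way c0 (by simp)
              have e1 := h3way c1 (by simp)
              have e2 := h3way c2 (by simp)
              have e4 := h3way c4 (by simp)
              have e5 := h3way c5 (by simp)
              have e6 := h3way c6 (by simp)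
              rcases e0 with rfl | rfl | rfl <;> rcases e1 with rfl | rfl | rfl <;>
                rcases e2 with rfl | rfl | rfl <;> rcases e4 with rfl | rfl | rfl <;>
                rcases e5 with rfl | rfl | rfl <;> rcases e6 with rfl | rfl | rfl <;>
                first
                  | exact absurd hd1 (by decide)
                  | decide
            · have hprop : ∀ q ∈ vpPats, q.count 'd' = 0 ∨
                  (q.length = 8 ∧ q.getD 3 ' ' = 'd' ∧ q.getD 0 ' ' = 'a' ∧
                    q.getD 1 ' ' = 'a' ∧ q.getD 2 ' ' = 'a' ∧ q.count 'a' = 4) ∨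
                  (q.length = 8 ∧ q.getD 2 ' ' = 'd' ∧ q.getD 0 ' ' = 'a' ∧
                    q.getD 1 ' ' = 'a' ∧ q.count 'a' = 2) ∨
                  (q.length = 7 ∧ q.getD 3 ' ' = 'd') := by decide
              have hne : ∀ p ∈ vpPats, s ≠ p := by
                intro p hp heq
                rcases hprop p hp with h | h | h | h
                · rw [← heq] at h; omega
                · rw [← heq] at h; exact hg4 h
                · rw [← heq] at h; exact hg5 h
                · rw [← heq] at h; exact hg6 h
              rw [vpTail_fb s _ _ _ _ hne (by rintro ⟨-, -, h, -⟩; omega)]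
              rw [fb_align]
              simp only [List.getD] at hg4 hg5 hg6
              simp [vpBTail, hsp, hd1, hg4, hg5, hg6]
      · have hprop : ∀ q ∈ vpPats, q.count 'd' ≤ 1 := by decide
        have hne : ∀ p ∈ vpPats, s ≠ p := by
          intro p hp heq
          have h := hprop p hp
          rw [← heq] at h
          omega
        rw [vpTail_fb s _ _ _ _ hne (by rintro ⟨-, -, h, -⟩; exact hd0 h)]
        rw [fb_align]
        simp [vpBTail, hsp, hd0, hd1]
  · have hspm : ' ' ∈ s := by
      rcases Nat.eq_zero_or_pos (s.count ' ') with h | h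
      · exact absurd h hsp
      · exact List.count_pos_iff.mp h
    have hprop : ∀ q ∈ vpPats, ' ' ∉ q := by decide
    have hne : ∀ p ∈ vpPats, s ≠ p := by
      intro p hp heq
      exact hprop p hp (heq ▸ hspm)
    rw [vpTail_fb s _ _ _ _ hne (by rintro ⟨-, -, -, h⟩; exact hsp h)]
    rw [fb_align]
    simp [vpBTail, hsp]

-- A's loop is: tail applied to cl ++ signature, counters advanced by the signature's class counts
theorem vpLoop_eq (l : List Char) : ∀ (letters digits dashes spaces : Nat) (cl : List Char),
    vpLoop l letters digits dashes spaces cl =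
      vpTail (cl ++ l.map vpKind)
        (letters + (l.map vpKind).count 'a') (digits + (l.map vpKind).count 'n')
        (dashes + (l.map vpKind).count 'd') (spaces + (l.map vpKind).count ' ') := by
  induction l with
  | nil => intro letters digits dashes spaces cl; simp [vpLoop]
  | cons c rest ih =>
    intro letters digits dashes spaces cl
    by_cases hs : c = ' '
    · simp [vpLoop, hs, ih, vpKind, List.append_assoc, Nat.add_comm, Nat.add_left_comm]
    · by_cases hd : c = '-'
      · simp [vpLoop, hd, ih, vpKind, List.append_assoc, Nat.add_comm, Nat.add_left_comm]
      · by_cases ha : PySem.Chars.isalpha c = true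
        · simp [vpLoop, hs, hd, ha, ih, vpKind, List.append_assoc, Nat.add_comm, Nat.add_left_comm]
        · simp [vpLoop, hs, hd, ha, ih, vpKind, List.append_assoc, Nat.add_comm, Nat.add_left_comm]

-- B's counting fold computes the class counts of the signature
theorem vpFold_eq (l : List Char) : ∀ (a b c d : Nat),
    l.foldl vpCountStep (a, b, c, d) =
      (a + (l.map vpKind).count 'a', b + (l.map vpKind).count 'n',
       c + (l.map vpKind).count 'd', d + (l.map vpKind).count ' ') := by
  induction l with
  | nil => intro a b c d; simp
  | cons ch rest ih =>
    intro a b c d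
    rcases vpKind_mem ch with hk | hk | hk | hk <;>
      simp [List.foldl, vpCountStep, hk, ih, Nat.add_comm, Nat.add_left_comm]

-- B's positional read factors through the signature
theorem vpK_eq (l : List Char) (i : Nat) :
    vpKind (l.getD i ' ') = (l.map vpKind).getD i ' ' := by
  simp only [List.getD, List.getElem?_map]
  cases l[i]? <;> rfl

-- B equals its signature-level decision tree
theorem vpAlt_eq (plate : String) :
    verifyPlate_alt plate =
      if PySem.Str.len plate > 8 then "IV" else vpBTail (plate.toList.map vpKind) := by
  by_cases h : PySem.Str.len plate > 8
  · simp only [verifyPlate_alt, h, if_true]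
  · simp only [verifyPlate_alt, vpBTail, h, if_false]
    simp only [vpFold_eq, vpK_eq, List.length_map, Nat.zero_add]

-- ===== VERDICT (by name: the statement is the Claim_ definition above) =====
theorem verifyPlate_spec : Claim_equal_verifyPlate := by
  intro plate _
  unfold Spec_verifyPlate
  rw [vpAlt_eq]
  unfold verifyPlate
  by_cases h : PySem.Str.len plate > 8
  · simp only [h, if_true]
  · simp only [h, if_false]
    rw [vpLoop_eq]
    simp only [List.nil_append, Nat.zero_add]
    exact tails_eq _ (by
      intro c hc
      rcases List.mem_map.1 hc with ⟨x, -, rfl⟩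
      exact vpKind_mem x)
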